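-- pv_equiv track=rewrite | github.com/otvernites/Just-for-fun22 | Yandex_backend_entrance_tests/task1.py | str_match
-- ===== SOURCE A (Python) =====
-- def str_match(a, b):
--     str_len = len(a)
--     result = ["I"] * str_len
--
--     letter_dict = {}
--     # подсчет букв оригинальной строки
--     for letter in a:
--         if letter not in letter_dict.keys():
--             letter_dict[letter] = 1
--         else:
--             letter_dict[letter] += 1
--
--     # заполнение точно подходящих P
--     for i in range(str_len):
--         if a[i] == b[i] and letter_dict[a[i]] >= 1:
--             letter_dict[a[i]] -= 1
--             result[i] = "P"
--
--     # заполнение остатков S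
--     for i in range(str_len):
--         if b[i] in letter_dict.keys() and a[i] != b[i] and letter_dict[b[i]] >= 1:
--             letter_dict[b[i]] -= 1
--             result[i] = "S"
--
--     return ''.join(result)
-- ===== SOURCE B (Python) =====
-- def str_match(a, b):
--     # Stateless closed form: position i is 'S' iff its left-to-right rank among
--     # mismatched positions showing the letter b[i] is below that letter's supply in a.
--     def tag(i):
--         if a[i] == b[i]:
--             return 'P'
--         supply = sum(1 for j in range(len(a)) if a[j] != b[j] and a[j] == b[i])
--         rank = sum(1 for j in range(i) if a[j] != b[j] and b[j] == b[i])
--         return 'S' if rank < supply else 'I'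
--     return ''.join(tag(i) for i in range(len(a)))
-- ===== Notes on version B (the rewrite author's own statement) =====
-- stated objective: simpler
-- what changed: B is stateless: instead of A's mutable letter counter consumed across three passes, B decides each position independently by a closed-form rule -- 'P' on an exact match, else 'S' iff the position's left-to-right rank among mismatched positions showing letter b[i] is below that letter's supply (occurrences of it in a at mismatched positions), else 'I'.
import Mathlib
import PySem

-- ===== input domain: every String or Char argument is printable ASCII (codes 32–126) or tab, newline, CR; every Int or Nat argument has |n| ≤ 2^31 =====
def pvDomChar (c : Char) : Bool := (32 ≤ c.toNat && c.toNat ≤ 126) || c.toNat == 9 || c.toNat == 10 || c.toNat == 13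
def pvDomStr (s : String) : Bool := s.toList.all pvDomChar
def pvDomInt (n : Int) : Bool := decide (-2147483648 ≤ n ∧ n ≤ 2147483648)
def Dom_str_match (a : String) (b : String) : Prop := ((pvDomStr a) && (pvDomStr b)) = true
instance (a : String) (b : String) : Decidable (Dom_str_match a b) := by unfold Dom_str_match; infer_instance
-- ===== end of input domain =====

-- B replaces A's mutable letter-counter consumed across three passes by a stateless closed-form
-- per-position rule (rank among mismatched positions vs. that letter's supply); simpler, not faster.


-- ===== PORT A =====
-- A-side helpers: the three loop bodies of A, named so the proofs can speak about them.
-- Python's letter_dict[x] (plain indexing) is ported as getD x 0: at every use the key is provably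
-- present (the letter occurs in a), so the default is never taken and the port is exact there.
def pvA_count (d : PySem.Dict Char Int) (c : Char) : PySem.Dict Char Int :=
  if d.contains c = false then d.insert c 1 else d.insert c (d.getD c 0 + 1)

def pvA_P (la lb : List Char) (st : PySem.Dict Char Int × List Char) (i : Int) :
    PySem.Dict Char Int × List Char :=
  let ai := PySem.List.pyGetD la i ' '
  if ai = PySem.List.pyGetD lb i ' ' ∧ 1 ≤ st.1.getD ai 0 then
    (st.1.insert ai (st.1.getD ai 0 - 1), PySem.List.pySetD st.2 i 'P')
  else st

def pvA_S (la lb : List Char) (st : PySem.Dict Char Int × List Char) (i : Int) :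
    PySem.Dict Char Int × List Char :=
  let bi := PySem.List.pyGetD lb i ' '
  if st.1.contains bi = true ∧ PySem.List.pyGetD la i ' ' ≠ bi ∧ 1 ≤ st.1.getD bi 0 then
    (st.1.insert bi (st.1.getD bi 0 - 1), PySem.List.pySetD st.2 i 'S')
  else st

-- ''.join(result) over one-character strings is ported as String.mk of the char list.
def str_match (a : String) (b : String) : String :=
  let la := a.toList
  let lb := b.toList
  let n := la.length
  let result := List.replicate n 'I'
  let d0 := la.foldl pvA_count PySem.Dict.empty
  let st1 := (PySem.List.pyRange 0 n 1).foldl (pvA_P la lb) (d0, result)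
  let st2 := (PySem.List.pyRange 0 n 1).foldl (pvA_S la lb) st1
  String.mk st2.2

-- ===== PORT B =====
-- B-side helpers: the two inline sums of Source B's tag(i), as counting folds over range(...).
def pvB_supply (la lb : List Char) (c : Char) : Int :=
  (PySem.List.pyRange 0 (la.length : Int) 1).foldl
    (fun s j => if PySem.List.pyGetD la j ' ' ≠ PySem.List.pyGetD lb j ' ' ∧
                   PySem.List.pyGetD la j ' ' = c then s + 1 else s) 0

def pvB_rank (la lb : List Char) (i : Int) (c : Char) : Int :=
  (PySem.List.pyRange 0 i 1).foldl
    (fun s j => if PySem.List.pyGetD la j ' ' ≠ PySem.List.pyGetD lb j ' ' ∧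
                   PySem.List.pyGetD lb j ' ' = c then s + 1 else s) 0

def pvB_tag (la lb : List Char) (i : Int) : Char :=
  if PySem.List.pyGetD la i ' ' = PySem.List.pyGetD lb i ' ' then 'P'
  else if pvB_rank la lb i (PySem.List.pyGetD lb i ' ')
          < pvB_supply la lb (PySem.List.pyGetD lb i ' ') then 'S'
  else 'I'

def str_match_alt (a : String) (b : String) : String :=
  String.mk ((PySem.List.pyRange 0 (a.toList.length : Int) 1).map (pvB_tag a.toList b.toList))

-- ===== PRECONDITION & SPEC =====
-- Pre_ excludes exactly the inputs with len(a) > len(b), on which A (and B alike) raises IndexError at b[i].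
def Pre_str_match (a : String) (b : String) : Prop := a.toList.length ≤ b.toList.length
instance (a : String) (b : String) : Decidable (Pre_str_match a b) := by
  unfold Pre_str_match; infer_instance

def pvWitness_str_match : String × String := ("abca", "acab")

def Spec_str_match (a : String) (b : String) (out : String) : Prop := out = str_match_alt a b
instance (a : String) (b : String) (out : String) : Decidable (Spec_str_match a b out) := by
  unfold Spec_str_match; infer_instance

-- ===== CLAIM (what is proved, stated in full; the proofs are below) =====
def Claim_equal_str_match : Prop := ∀ (a : String) (b : String), Dom_str_match a b →
  Pre_str_match a b → Spec_str_match a b (str_match a b)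

-- ===== LEMMAS AND PROOFS =====

-- the P/I marking A's P pass produces
def pvMark (la lb : List Char) : List Char :=
  List.zipWith (fun x y => if x = y then 'P' else 'I') la lb

-- supply: per-letter count of a's letters at mismatched positions
def pvUmc (la lb : List Char) (c : Char) : Int :=
  ((la.zip lb).countP (fun p => decide (p.1 = c ∧ p.1 ≠ p.2)) : Int)

-- rank: per-letter count of mismatched positions before k showing c in b
def pvRk (la lb : List Char) (k : Nat) (c : Char) : Int :=
  (((la.take k).zip (lb.take k)).countP (fun p => decide (p.2 = c ∧ p.1 ≠ p.2)) : Int)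

theorem pvA_count_getD (la : List Char) (d : PySem.Dict Char Int) (v : Char) :
    (la.foldl pvA_count d).getD v 0 = d.getD v 0 + la.count v := by
  have h : la.foldl pvA_count d
      = la.foldl (fun d c => d.insert c (d.getD c 0 + 1)) d := by
    apply PySem.List.foldl_congr_mem
    intro acc x _
    unfold pvA_count
    by_cases hc : acc.contains x = false
    · simp [hc, PySem.Dict.getD_of_not_contains acc (0 : Int) hc]
    · simp [hc]
  rw [h, PySem.Dict.getD_foldl_insert_add_one]

theorem pvA_count_contains (la : List Char) :
    ∀ (d : PySem.Dict Char Int) (c : Char),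
      (la.foldl pvA_count d).contains c = (d.contains c || la.contains c) := by
  induction la with
  | nil => intro d c; simp
  | cons x t ih =>
    intro d c
    have hx : (pvA_count d x).contains c = (c == x || d.contains c) := by
      unfold pvA_count
      by_cases hc : d.contains x = false <;>
        simp [hc, PySem.Dict.contains_insert]
    simp only [List.foldl_cons, ih, hx, List.contains_cons]
    rcases Decidable.em (c = x) with h | h
    · subst h; simp
    · have h1 : (c == x) = false := by simpa using h
      have h2 : (x == c) = false := by simpa using fun e => h e.symm
      simp [h1, h2]

theorem pvPA (la lb : List Char) (hlen : la.length ≤ lb.length) :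
    ∀ (m k : Nat), k + m = la.length →
    ∀ (d : PySem.Dict Char Int) (e : Char → Int) (p : List Char),
    p.length = k → (∀ c, 0 ≤ e c) →
    (∀ c, d.getD c 0 = (la.drop k).count c + e c) →
    ((PySem.List.pyRange (k : Int) (la.length : Int) 1).foldl (pvA_P la lb)
        (d, p ++ List.replicate m 'I')).2
      = p ++ pvMark (la.drop k) (lb.drop k) ∧
    ∀ c, ((PySem.List.pyRange (k : Int) (la.length : Int) 1).foldl (pvA_P la lb)
        (d, p ++ List.replicate m 'I')).1.getD c 0
      = e c + pvUmc (la.drop k) (lb.drop k) c := by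
  intro m
  induction m with
  | zero =>
    intro k hk d e p hp he hd
    rw [PySem.List.pyRange_one_eq_nil (by omega : (la.length : Int) ≤ (k : Int))]
    have hda : la.drop k = [] := List.drop_eq_nil_of_le (by omega)
    refine ⟨by simp [hda, pvMark], fun c => ?_⟩
    simp only [List.foldl_nil]
    rw [hd c]
    simp [hda, pvUmc]
  | succ m ih =>
    intro k hk d e p hp he hd
    have hkn : k < la.length := by omega
    have hkb : k < lb.length := by omega
    have hdropA : la.drop k = la[k] :: la.drop (k + 1) := List.drop_eq_getElem_cons hkn
    have hdropB : lb.drop k = lb[k] :: lb.drop (k + 1) := List.drop_eq_getElem_cons hkb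
    rw [PySem.List.pyRange_one_cons (by exact_mod_cast hkn)]
    simp only [List.foldl_cons]
    rw [show ((k : Int) + 1) = ((k + 1 : Nat) : Int) from by push_cast; ring]
    have hai : PySem.List.pyGetD la (k : Int) ' ' = la[k] := by
      simp [List.getD_eq_getElem?_getD, List.getElem?_eq_getElem hkn]
    have hbi : PySem.List.pyGetD lb (k : Int) ' ' = lb[k] := by
      simp [List.getD_eq_getElem?_getD, List.getElem?_eq_getElem hkb]
    have hpos : 1 ≤ d.getD la[k] 0 := by
      rw [hd la[k], hdropA, List.count_cons_self]
      have := he la[k]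
      push_cast
      omega
    by_cases hm : la[k] = lb[k]
    · -- matched position: P is written, the count of la[k] is decremented
      have hstep : pvA_P la lb (d, p ++ List.replicate (m + 1) 'I') (k : Int)
          = (d.insert la[k] (d.getD la[k] 0 - 1),
             (p ++ List.replicate (m + 1) 'I').set k 'P') := by
        unfold pvA_P
        rw [hai, hbi, if_pos ⟨hm, hpos⟩]
        simp
      rw [hstep]
      have hset : (p ++ List.replicate (m + 1) 'I').set k 'P'
          = (p ++ ['P']) ++ List.replicate m 'I' := by
        simp [hp, List.replicate_succ]
      rw [hset]
      have hd' : ∀ c, (d.insert la[k] (d.getD la[k] 0 - 1)).getD c 0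
          = (la.drop (k + 1)).count c + e c := by
        intro c
        rw [PySem.Dict.getD_insert]
        by_cases hc : c = la[k]
        · subst hc
          rw [if_pos rfl, hd la[k], hdropA, List.count_cons_self]
          push_cast
          ring
        · rw [if_neg hc, hd c, hdropA, List.count_cons_of_ne (fun h => hc h.symm)]
      obtain ⟨h1, h2⟩ := ih (k + 1) (by omega) _ e (p ++ ['P'])
        (by simp [hp]) he hd'
      constructor
      · rw [h1, hdropA, hdropB]
        simp only [pvMark, List.zipWith_cons_cons, if_pos hm]
        simp
      · intro c
        rw [h2 c, hdropA, hdropB]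
        have : pvUmc (la[k] :: la.drop (k + 1)) (lb[k] :: lb.drop (k + 1)) c
            = pvUmc (la.drop (k + 1)) (lb.drop (k + 1)) c := by
          simp only [pvUmc, List.zip_cons_cons, List.countP_cons]
          have : decide (la[k] = c ∧ la[k] ≠ lb[k]) = false := by
            simp [hm]
          rw [this]
          simp
        rw [this]
    · -- mismatched position: nothing happens, la[k] joins the unmatched extra
      have hstep : pvA_P la lb (d, p ++ List.replicate (m + 1) 'I') (k : Int)
          = (d, p ++ List.replicate (m + 1) 'I') := by
        unfold pvA_P
        rw [hai, hbi, if_neg (by tauto)]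
      rw [hstep]
      have hsplit : p ++ List.replicate (m + 1) 'I'
          = (p ++ ['I']) ++ List.replicate m 'I' := by
        simp [List.replicate_succ]
      rw [hsplit]
      have hd' : ∀ c, d.getD c 0
          = (la.drop (k + 1)).count c + (e c + if c = la[k] then 1 else 0) := by
        intro c
        by_cases hc : c = la[k]
        · subst hc
          rw [hd la[k], hdropA, List.count_cons_self, if_pos rfl]
          push_cast
          ring
        · rw [hd c, hdropA, List.count_cons_of_ne (fun h => hc h.symm), if_neg hc]
          ring
      obtain ⟨h1, h2⟩ := ih (k + 1) (by omega) d
        (fun c => e c + if c = la[k] then 1 else 0) (p ++ ['I'])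
        (by simp [hp])
        (fun c => by
          have h1 := he c
          simp only []
          by_cases hc : c = la[k]
          · rw [if_pos hc]; omega
          · rw [if_neg hc]; omega) hd'
      constructor
      · rw [h1, hdropA, hdropB]
        simp only [pvMark, List.zipWith_cons_cons, if_neg hm]
        simp
      · intro c
        rw [h2 c, hdropA, hdropB]
        have : pvUmc (la[k] :: la.drop (k + 1)) (lb[k] :: lb.drop (k + 1)) c
            = (if c = la[k] then 1 else 0) + pvUmc (la.drop (k + 1)) (lb.drop (k + 1)) c := by
          simp only [pvUmc, List.zip_cons_cons, List.countP_cons]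
          by_cases hc : c = la[k]
          · have hd : decide (la[k] = c ∧ la[k] ≠ lb[k]) = true := by
              simp [hc, hm]
            rw [hd, if_pos hc]
            push_cast
            norm_num
            ring
          · have hd : decide (la[k] = c ∧ la[k] ≠ lb[k]) = false := by
              simp
              intro h
              exact absurd h.symm hc
            rw [hd, if_neg hc]
            simp
        rw [this]
        ring

-- A's P pass keeps the dict's key set equal to the letters of a
theorem pvPA_contains (la lb : List Char) :
    ∀ (idxs : List Int) (d : PySem.Dict Char Int) (p : List Char),
    (∀ c, d.contains c = la.contains c) →
    ∀ c, ((idxs.foldl (pvA_P la lb) (d, p)).1).contains c = la.contains c := by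
  intro idxs
  induction idxs with
  | nil => intro d p hd c; simpa using hd c
  | cons i t ih =>
    intro d p hd c
    simp only [List.foldl_cons]
    unfold pvA_P
    by_cases h : PySem.List.pyGetD la i ' ' = PySem.List.pyGetD lb i ' ' ∧
        1 ≤ d.getD (PySem.List.pyGetD la i ' ') 0
    · rw [if_pos h]
      apply ih
      intro c'
      rw [PySem.Dict.contains_insert]
      have hla : la.contains (PySem.List.pyGetD la i ' ') = true := by
        by_contra hno
        have hfalse : d.contains (PySem.List.pyGetD la i ' ') = false := by
          rw [hd]
          simpa using hno
        rw [PySem.Dict.getD_of_not_contains d (0 : Int) hfalse] at h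
        omega
      by_cases hc : c' = PySem.List.pyGetD la i ' '
      · subst hc
        simp only [beq_self_eq_true, Bool.true_or]
        exact hla.symm
      · have hb : (c' == PySem.List.pyGetD la i ' ') = false := by simpa using hc
        simp only [hb, Bool.false_or]
        exact hd c'
    · rw [if_neg h]
      exact ih d p hd c

theorem pvRk_zero (la lb : List Char) (c : Char) : pvRk la lb 0 c = 0 := by
  simp [pvRk]

theorem pvRk_succ (la lb : List Char) (k : Nat) (c : Char)
    (hka : k < la.length) (hkb : k < lb.length) :
    pvRk la lb (k + 1) c
      = pvRk la lb k c + (if lb[k] = c ∧ la[k] ≠ lb[k] then 1 else 0) := by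
  unfold pvRk
  rw [List.take_add_one, List.take_add_one,
      List.getElem?_eq_getElem hka, List.getElem?_eq_getElem hkb]
  simp only [Option.toList_some]
  rw [List.zip_append (by simp [hka.le, hkb.le])]
  simp only [List.zip_cons_cons, List.zip_nil_right,
    List.countP_append, List.countP_cons, List.countP_nil]
  by_cases h : lb[k] = c ∧ la[k] ≠ lb[k]
  · rw [if_pos h]
    have hdec : decide ((la[k], lb[k]).2 = c ∧ (la[k], lb[k]).1 ≠ (la[k], lb[k]).2) = true := by
      simpa using h
    simp only [hdec, if_true]
    push_cast
    ring
  · rw [if_neg h]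
    have hdec : decide ((la[k], lb[k]).2 = c ∧ (la[k], lb[k]).1 ≠ (la[k], lb[k]).2) = false := by
      simpa using h
    simp [hdec]

theorem pvRk_nonneg (la lb : List Char) (k : Nat) (c : Char) : 0 ≤ pvRk la lb k c := by
  unfold pvRk; positivity

theorem pvUmc_nonneg (la lb : List Char) (c : Char) : 0 ≤ pvUmc la lb c := by
  unfold pvUmc; positivity

theorem pvUmc_pos_mem (la lb : List Char) (c : Char) (h : 1 ≤ pvUmc la lb c) :
    la.contains c = true := by
  unfold pvUmc at h
  have hpos : 0 < (la.zip lb).countP (fun p => decide (p.1 = c ∧ p.1 ≠ p.2)) := by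
    exact_mod_cast h
  rw [List.countP_pos_iff] at hpos
  obtain ⟨⟨x, y⟩, hmem, hp⟩ := hpos
  have hx : x = c := by simpa using (of_decide_eq_true hp).1
  subst hx
  have := (List.of_mem_zip hmem).1
  simpa using this

-- B's rank fold equals the closed-form rank (over in-range prefixes)
theorem pvB_rank_eq (la lb : List Char) (c : Char) :
    ∀ k : Nat, k ≤ la.length → la.length ≤ lb.length →
      pvB_rank la lb (k : Int) c = pvRk la lb k c := by
  intro k
  induction k with
  | zero =>
    intro _ _
    unfold pvB_rank
    rw [PySem.List.pyRange_one_eq_nil (by norm_num)]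
    simp [pvRk]
  | succ k ih =>
    intro hk hlen
    have hka : k < la.length := by omega
    have hkb : k < lb.length := by omega
    unfold pvB_rank
    rw [show ((k + 1 : Nat) : Int) = (k : Int) + 1 from by push_cast; ring]
    rw [PySem.List.pyRange_one_succ_right (by positivity)]
    rw [List.foldl_append]
    have hprev := ih (by omega) hlen
    unfold pvB_rank at hprev
    rw [hprev]
    simp only [List.foldl_cons, List.foldl_nil]
    have hai : PySem.List.pyGetD la (k : Int) ' ' = la[k] := by
      simp [List.getD_eq_getElem?_getD, List.getElem?_eq_getElem hka]
    have hbi : PySem.List.pyGetD lb (k : Int) ' ' = lb[k] := by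
      simp [List.getD_eq_getElem?_getD, List.getElem?_eq_getElem hkb]
    rw [hai, hbi, pvRk_succ la lb k c hka hkb]
    by_cases h : la[k] ≠ lb[k] ∧ lb[k] = c
    · rw [if_pos h, if_pos ⟨h.2, h.1⟩]
    · rw [if_neg h, if_neg (fun hh => h ⟨hh.2, hh.1⟩)]
      ring

-- B's supply fold equals the closed-form supply
theorem pvB_supply_eq (la lb : List Char) (c : Char) (hlen : la.length ≤ lb.length) :
    pvB_supply la lb c = pvUmc la lb c := by
  have main : ∀ k : Nat, k ≤ la.length →
      (PySem.List.pyRange 0 (k : Int) 1).foldl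
        (fun s j => if PySem.List.pyGetD la j ' ' ≠ PySem.List.pyGetD lb j ' ' ∧
                       PySem.List.pyGetD la j ' ' = c then s + 1 else s) 0
      = (((la.take k).zip (lb.take k)).countP
          (fun p => decide (p.1 = c ∧ p.1 ≠ p.2)) : Int) := by
    intro k
    induction k with
    | zero =>
      intro _
      rw [PySem.List.pyRange_one_eq_nil (by norm_num)]
      simp
    | succ k ih =>
      intro hk
      have hka : k < la.length := by omega
      have hkb : k < lb.length := by omega
      rw [show ((k + 1 : Nat) : Int) = (k : Int) + 1 from by push_cast; ring]
      rw [PySem.List.pyRange_one_succ_right (by positivity)]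
      rw [List.foldl_append, ih (by omega)]
      simp only [List.foldl_cons, List.foldl_nil]
      have hai : PySem.List.pyGetD la (k : Int) ' ' = la[k] := by
        simp [List.getD_eq_getElem?_getD, List.getElem?_eq_getElem hka]
      have hbi : PySem.List.pyGetD lb (k : Int) ' ' = lb[k] := by
        simp [List.getD_eq_getElem?_getD, List.getElem?_eq_getElem hkb]
      rw [hai, hbi]
      rw [List.take_add_one, List.take_add_one,
          List.getElem?_eq_getElem hka, List.getElem?_eq_getElem hkb]
      simp only [Option.toList_some]
      rw [List.zip_append (by simp [hka.le, hkb.le])]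
      simp only [List.zip_cons_cons, List.zip_nil_right,
        List.countP_append, List.countP_cons, List.countP_nil]
      by_cases h : la[k] ≠ lb[k] ∧ la[k] = c
      · rw [if_pos h]
        have hdec : decide ((la[k], lb[k]).1 = c ∧ (la[k], lb[k]).1 ≠ (la[k], lb[k]).2) = true := by
          simpa using ⟨h.2, h.1⟩
        simp only [hdec, if_true]
        push_cast
        ring
      · rw [if_neg h]
        have hdec : decide ((la[k], lb[k]).1 = c ∧ (la[k], lb[k]).1 ≠ (la[k], lb[k]).2) = false := by
          simp only [decide_eq_false_iff_not]
          intro hh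
          exact h ⟨hh.2, hh.1⟩
        simp [hdec]
  have hfin := main la.length le_rfl
  unfold pvB_supply pvUmc
  rw [hfin]
  have hzz : (la.take la.length).zip (lb.take la.length) = la.zip lb := by
    rw [List.zip_eq_zipWith, List.zip_eq_zipWith, ← List.take_zipWith]
    exact List.take_of_length_le (by rw [List.length_zipWith]; omega)
  rw [hzz]

-- A's S pass, started from the P marking and the supply counter, yields exactly B's tags
theorem pvS2 (la lb : List Char) (hlen : la.length ≤ lb.length) :
    ∀ (m k : Nat), k + m = la.length →
    ∀ (d : PySem.Dict Char Int) (p : List Char),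
    p.length = k →
    (∀ c, d.getD c 0 = if pvRk la lb k c < pvUmc la lb c
                       then pvUmc la lb c - pvRk la lb k c else 0) →
    (∀ c, d.contains c = la.contains c) →
    ((PySem.List.pyRange (k : Int) (la.length : Int) 1).foldl (pvA_S la lb)
        (d, p ++ (pvMark la lb).drop k)).2
      = p ++ (PySem.List.pyRange (k : Int) (la.length : Int) 1).map (pvB_tag la lb) := by
  intro m
  induction m with
  | zero =>
    intro k hk d p hp hd hcont
    rw [PySem.List.pyRange_one_eq_nil (by omega : (la.length : Int) ≤ (k : Int))]
    have hda : (pvMark la lb).drop k = [] := by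
      apply List.drop_eq_nil_of_le
      simp only [pvMark, List.length_zipWith]
      omega
    simp [hda]
  | succ m ih =>
    intro k hk d p hp hd hcont
    have hkn : k < la.length := by omega
    have hkb : k < lb.length := by omega
    have hkm : k < (pvMark la lb).length := by
      simp only [pvMark, List.length_zipWith]
      omega
    have hdropM : (pvMark la lb).drop k = (pvMark la lb)[k] :: (pvMark la lb).drop (k + 1) :=
      List.drop_eq_getElem_cons hkm
    have hmk : (pvMark la lb)[k] = if la[k] = lb[k] then 'P' else 'I' := by
      simp [pvMark]
    have hai : PySem.List.pyGetD la (k : Int) ' ' = la[k] := by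
      simp [List.getD_eq_getElem?_getD, List.getElem?_eq_getElem hkn]
    have hbi : PySem.List.pyGetD lb (k : Int) ' ' = lb[k] := by
      simp [List.getD_eq_getElem?_getD, List.getElem?_eq_getElem hkb]
    rw [PySem.List.pyRange_one_cons (by exact_mod_cast hkn)]
    simp only [List.foldl_cons, List.map_cons]
    rw [show ((k : Int) + 1) = ((k + 1 : Nat) : Int) from by push_cast; ring]
    have htag : pvB_tag la lb (k : Int)
        = if la[k] = lb[k] then 'P'
          else if pvRk la lb k lb[k] < pvUmc la lb lb[k] then 'S' else 'I' := by
      unfold pvB_tag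
      rw [hai, hbi, pvB_rank_eq la lb lb[k] k hkn.le hlen, pvB_supply_eq la lb lb[k] hlen]
    by_cases hm : la[k] = lb[k]
    · -- matched: A's S step is the identity, B tags 'P'
      have hstep : pvA_S la lb (d, p ++ (pvMark la lb).drop k) (k : Int)
          = (d, p ++ (pvMark la lb).drop k) := by
        unfold pvA_S
        simp only [hai, hbi]
        rw [if_neg (by tauto)]
      rw [hstep]
      have hsplit : p ++ (pvMark la lb).drop k
          = (p ++ ['P']) ++ (pvMark la lb).drop (k + 1) := by
        rw [hdropM, hmk, if_pos hm]
        simp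
      rw [hsplit]
      have hd' : ∀ c, d.getD c 0 = if pvRk la lb (k + 1) c < pvUmc la lb c
          then pvUmc la lb c - pvRk la lb (k + 1) c else 0 := by
        intro c
        have hr : pvRk la lb (k + 1) c = pvRk la lb k c := by
          rw [pvRk_succ la lb k c hkn hkb]
          simp [hm]
        rw [hr, hd c]
      rw [ih (k + 1) (by omega) d (p ++ ['P']) (by simp [hp]) hd' hcont]
      rw [htag, if_pos hm]
      simp
    · by_cases hrs : pvRk la lb k lb[k] < pvUmc la lb lb[k]
      · -- mismatched with budget: A writes 'S' and decrements, B tags 'S'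
        have hgd : d.getD lb[k] 0 = pvUmc la lb lb[k] - pvRk la lb k lb[k] := by
          rw [hd lb[k], if_pos hrs]
        have hrnn := pvRk_nonneg la lb k lb[k]
        have hge1 : 1 ≤ d.getD lb[k] 0 := by rw [hgd]; omega
        have hmem : la.contains lb[k] = true :=
          pvUmc_pos_mem la lb lb[k] (by omega)
        have hcontbk : d.contains lb[k] = true := by rw [hcont lb[k]]; exact hmem
        have hstep : pvA_S la lb (d, p ++ (pvMark la lb).drop k) (k : Int)
            = (d.insert lb[k] (d.getD lb[k] 0 - 1),
               PySem.List.pySetD (p ++ (pvMark la lb).drop k) (k : Int) 'S') := by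
          unfold pvA_S
          simp only [hai, hbi]
          rw [if_pos ⟨hcontbk, hm, hge1⟩]
        rw [hstep]
        have hsetd : PySem.List.pySetD (p ++ (pvMark la lb).drop k) (k : Int) 'S'
            = (p ++ ['S']) ++ (pvMark la lb).drop (k + 1) := by
          rw [PySem.List.pySetD_natCast, hdropM, hmk, if_neg hm, List.set_append]
          simp [hp]
        rw [hsetd]
        have hd' : ∀ c, (d.insert lb[k] (d.getD lb[k] 0 - 1)).getD c 0
            = if pvRk la lb (k + 1) c < pvUmc la lb c
              then pvUmc la lb c - pvRk la lb (k + 1) c else 0 := by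
          intro c
          rw [PySem.Dict.getD_insert]
          by_cases hc : c = lb[k]
          · rw [if_pos hc, hgd, hc]
            have hr : pvRk la lb (k + 1) lb[k] = pvRk la lb k lb[k] + 1 := by
              rw [pvRk_succ la lb k lb[k] hkn hkb]
              simp [hm]
            rw [hr]
            split_ifs <;> omega
          · rw [if_neg hc, hd c]
            have hne : lb[k] ≠ c := fun hh => hc hh.symm
            have hr : pvRk la lb (k + 1) c = pvRk la lb k c := by
              rw [pvRk_succ la lb k c hkn hkb]
              simp [hne]
            rw [hr]
        have hcont' : ∀ c, (d.insert lb[k] (d.getD lb[k] 0 - 1)).contains c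
            = la.contains c := by
          intro c
          rw [PySem.Dict.contains_insert]
          by_cases hc : c = lb[k]
          · subst hc
            simp only [beq_self_eq_true, Bool.true_or]
            exact hmem.symm
          · have hb : (c == lb[k]) = false := by simpa using hc
            simp only [hb, Bool.false_or]
            exact hcont c
        rw [ih (k + 1) (by omega) _ (p ++ ['S']) (by simp [hp]) hd' hcont']
        rw [htag, if_neg hm, if_pos hrs]
        simp
      · -- mismatched, budget exhausted: A leaves 'I', B tags 'I'
        have hgd : d.getD lb[k] 0 = 0 := by rw [hd lb[k], if_neg hrs]
        have hstep : pvA_S la lb (d, p ++ (pvMark la lb).drop k) (k : Int)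
            = (d, p ++ (pvMark la lb).drop k) := by
          unfold pvA_S
          simp only [hai, hbi]
          rw [if_neg (by rw [hgd] at *; rintro ⟨-, -, hh⟩; omega)]
        rw [hstep]
        have hsplit : p ++ (pvMark la lb).drop k
            = (p ++ ['I']) ++ (pvMark la lb).drop (k + 1) := by
          rw [hdropM, hmk, if_neg hm]
          simp
        rw [hsplit]
        have hd' : ∀ c, d.getD c 0 = if pvRk la lb (k + 1) c < pvUmc la lb c
            then pvUmc la lb c - pvRk la lb (k + 1) c else 0 := by
          intro c
          by_cases hc : c = lb[k]
          · subst hc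
            have hr : pvRk la lb (k + 1) lb[k] = pvRk la lb k lb[k] + 1 := by
              rw [pvRk_succ la lb k lb[k] hkn hkb]
              simp [hm]
            rw [hgd, hr]
            split_ifs <;> omega
          · have hne : lb[k] ≠ c := fun hh => hc hh.symm
            have hr : pvRk la lb (k + 1) c = pvRk la lb k c := by
              rw [pvRk_succ la lb k c hkn hkb]
              simp [hne]
            rw [hr, hd c]
        rw [ih (k + 1) (by omega) d (p ++ ['I']) (by simp [hp]) hd' hcont]
        rw [htag, if_neg hm, if_neg hrs]
        simp

-- ===== VERDICT (by name: the statement is the Claim_ definition above) =====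
theorem str_match_spec : Claim_equal_str_match := by
  intro a b _ hlen
  unfold Pre_str_match at hlen
  unfold Spec_str_match str_match str_match_alt
  dsimp only []
  set la := a.toList
  set lb := b.toList
  have h0 : ∀ c, (la.foldl pvA_count PySem.Dict.empty).getD c 0
      = ((la.drop 0).count c : Int) + (fun _ : Char => (0 : Int)) c := by
    intro c
    rw [pvA_count_getD]
    simp
  obtain ⟨hA1, hA2⟩ := pvPA la lb hlen la.length 0 (by omega)
    (la.foldl pvA_count PySem.Dict.empty) (fun _ => (0 : Int)) [] rfl
    (fun c => le_refl 0) h0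
  simp only [List.nil_append, List.drop_zero, Nat.cast_zero] at hA1 hA2
  have hcont0 : ∀ c, (la.foldl pvA_count PySem.Dict.empty).contains c = la.contains c := by
    intro c
    rw [pvA_count_contains]
    simp
  have hcont1 := pvPA_contains la lb (PySem.List.pyRange 0 (la.length : Int) 1)
    (la.foldl pvA_count PySem.Dict.empty) (List.replicate la.length 'I') hcont0
  set st1 := (PySem.List.pyRange 0 (la.length : Int)).foldl (pvA_P la lb)
    (la.foldl pvA_count PySem.Dict.empty, List.replicate la.length 'I') with hstA
  have hdinv : ∀ c, st1.1.getD c 0 = if pvRk la lb 0 c < pvUmc la lb c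
      then pvUmc la lb c - pvRk la lb 0 c else 0 := by
    intro c
    rw [hA2 c, pvRk_zero]
    have := pvUmc_nonneg la lb c
    split_ifs <;> omega
  have hS := pvS2 la lb hlen la.length 0 (by omega) st1.1 [] rfl hdinv hcont1
  simp only [Nat.cast_zero, List.nil_append, List.drop_zero] at hS
  have hpair : st1 = (st1.1, pvMark la lb) := by
    rw [← hA1]
  rw [hpair] at *
  exact congrArg String.mk hS
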